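-- pv_equiv track=rewrite | github.com/loregamer/elevenlabs-sample-splitter | main.py | _calculate_split_points
-- ===== SOURCE A (Python) =====
-- def _calculate_split_points(non_silent_ranges, total_length_ms, max_length_ms, min_silence_len):
--     """Calculate optimal split points based on silence detection"""
--     # Start with the beginning of the audio
--     split_points = [0]
--     current_position = 0
--
--     while current_position < total_length_ms:
--         target_position = current_position + max_length_ms
--
--         if target_position >= total_length_ms:
--             break  # We've reached the end
--
--         # Find the best silence point before target_position
--         best_split_point = None
--
--         # Look for silence AFTER the last speech segment that ends before target_position
--         for i, (start, end) in enumerate(non_silent_ranges):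
--             if end < target_position:
--                 # If there's another speech segment after this one
--                 if i + 1 < len(non_silent_ranges):
--                     next_start = non_silent_ranges[i + 1][0]
--                     # If there's silence between this and the next segment
--                     if next_start - end > min_silence_len:
--                         best_split_point = end + min_silence_len // 2  # Mid-point of silence
--                 else:
--                     # This is the last speech segment
--                     best_split_point = end + min_silence_len // 2
--             elif start > target_position:
--                 # We've gone past the target position
--                 break
--
--         # If no good silence point found, use exactly max_length
--         if best_split_point is None:
--             # Look ahead for the next silence after target_position
--             for i, (start, end) in enumerate(non_silent_ranges):
--                 if start > target_position:
--                     # Found a speech segment that starts after our target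
--                     # If there's a previous segment with a gap, use that
--                     if i > 0:
--                         prev_end = non_silent_ranges[i-1][1]
--                         if start - prev_end > min_silence_len:
--                             best_split_point = prev_end + min_silence_len // 2
--                             break
--
--             # If still no good point, use target position
--             if best_split_point is None:
--                 best_split_point = target_position
--
--         split_points.append(best_split_point)
--         current_position = best_split_point
--
--     split_points.append(total_length_ms)  # End with the end of the audio
--     return split_points
-- ===== SOURCE B (Python) =====
-- def _calculate_split_points(non_silent_ranges, total_length_ms, max_length_ms, min_silence_len):
--     """Same split points, but each step finds its split with ONE combined pass over
--     adjacent segment pairs (carrying the previous segment) that computes the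
--     'silence before target' and 'silence after target' candidates simultaneously,
--     instead of A's two separate index-based scans with lookahead/lookbehind."""
--     half = min_silence_len // 2
--     ms = min_silence_len
--
--     def pick(t):
--         before = after = None
--         stopped = False
--         for (ps, pe), (s, e) in zip(non_silent_ranges, non_silent_ranges[1:]):
--             gap_ok = s - pe > ms
--             if not stopped:
--                 if pe < t:
--                     if gap_ok:
--                         before = pe + half
--                 elif ps > t:
--                     stopped = True
--             if after is None and s > t and gap_ok:
--                 after = pe + half
--         # the last segment needs no following gap to host a split
--         if non_silent_ranges and not stopped and non_silent_ranges[-1][1] < t: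
--             before = non_silent_ranges[-1][1] + half
--         if before is not None:
--             return before
--         if after is not None:
--             return after
--         return t
--
--     points = [0]
--     cur = 0
--     while cur < total_length_ms:
--         t = cur + max_length_ms
--         if t >= total_length_ms:
--             break
--         cur = pick(t)
--         points.append(cur)
--     points.append(total_length_ms)
--     return points
-- ===== Notes on version B (the rewrite author's own statement) =====
-- stated objective: alternative
-- what changed: B replaces A's two separate index-based scans per step (a forward overwrite scan with getD lookahead, then a second forward scan with lookbehind) by ONE combined pass over adjacent segment pairs carrying the previous segment in a small state machine (stopped/before/after) plus a last-segment fixup, with no indices at all.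
import Mathlib
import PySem

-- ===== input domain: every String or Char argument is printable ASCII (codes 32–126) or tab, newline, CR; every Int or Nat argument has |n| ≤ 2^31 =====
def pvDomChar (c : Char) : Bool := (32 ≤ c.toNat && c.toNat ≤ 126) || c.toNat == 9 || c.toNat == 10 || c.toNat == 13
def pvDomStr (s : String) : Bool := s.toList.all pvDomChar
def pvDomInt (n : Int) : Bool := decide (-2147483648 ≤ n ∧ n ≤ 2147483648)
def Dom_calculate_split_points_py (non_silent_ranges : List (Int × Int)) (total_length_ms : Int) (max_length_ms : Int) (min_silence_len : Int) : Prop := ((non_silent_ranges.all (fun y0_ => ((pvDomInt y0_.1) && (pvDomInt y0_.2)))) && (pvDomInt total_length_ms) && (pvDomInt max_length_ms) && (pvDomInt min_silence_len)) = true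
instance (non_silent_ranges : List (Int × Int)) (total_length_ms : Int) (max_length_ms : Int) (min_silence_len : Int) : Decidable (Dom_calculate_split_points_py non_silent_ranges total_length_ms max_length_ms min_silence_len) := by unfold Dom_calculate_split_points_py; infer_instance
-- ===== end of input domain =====

-- ===== PORT A =====
-- One honest line: B finds each split with a single combined pass over adjacent
-- segment pairs (a stopped/before/after state machine carrying the previous segment,
-- plus a last-segment fixup) instead of A's two separate index-based scans.

-- A's first inner loop: forward scan, overwriting `best`, breaking at the first
-- segment with end >= target and start > target.  Index accesses are guarded in the
-- Python (`i + 1 < len`), so `getD` is exact.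
def aBest1 (all : List (Int × Int)) (target ms : Int) :
    List (Int × Int) → Nat → Option Int → Option Int
  | [], _, best => best
  | (s, e) :: rest, i, best =>
    if e < target then
      if i + 1 < all.length then
        if (all.getD (i + 1) (0, 0)).1 - e > ms then
          aBest1 all target ms rest (i + 1) (some (e + PySem.Int.floordiv ms 2))
        else
          aBest1 all target ms rest (i + 1) best
      else
        aBest1 all target ms rest (i + 1) (some (e + PySem.Int.floordiv ms 2))
    else if s > target then best
    else aBest1 all target ms rest (i + 1) best

-- A's second inner loop: first segment starting past target whose preceding gap is valid.
def aBest2 (all : List (Int × Int)) (target ms : Int) :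
    List (Int × Int) → Nat → Option Int
  | [], _ => none
  | (s, _e) :: rest, i =>
    if s > target then
      if i > 0 then
        if s - (all.getD (i - 1) (0, 0)).2 > ms then
          some ((all.getD (i - 1) (0, 0)).2 + PySem.Int.floordiv ms 2)
        else aBest2 all target ms rest (i + 1)
      else aBest2 all target ms rest (i + 1)
    else aBest2 all target ms rest (i + 1)

-- A's while loop, fuelled.  Every returning Python run makes far fewer iterations
-- than this fuel (each iteration appends one split point), so the fuel is never
-- exhausted on an input where the Python returns; where the Python diverges the
-- fuelled port's value is not compared (nothing is claimed about A's own value).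
def aLoop (ranges : List (Int × Int)) (total maxL ms : Int) :
    Nat → Int → List Int → List Int
  | 0, _, pts => pts ++ [total]
  | fuel + 1, cur, pts =>
    if cur < total then
      let t := cur + maxL
      if t ≥ total then pts ++ [total]
      else
        let best :=
          match aBest1 ranges t ms ranges 0 none with
          | some b => b
          | none =>
            match aBest2 ranges t ms ranges 0 with
            | some b => b
            | none => t
        aLoop ranges total maxL ms fuel best (pts ++ [best])
    else pts ++ [total]

def calculate_split_points_py (non_silent_ranges : List (Int × Int)) (total_length_ms : Int) (max_length_ms : Int) (min_silence_len : Int) : List Int :=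
  aLoop non_silent_ranges total_length_ms max_length_ms min_silence_len
    (total_length_ms.toNat + 1099511627776) 0 [0]

-- ===== PORT B =====
-- Source B's single combined loop over zip(ranges, ranges[1:]), carrying the state
-- (stopped, before, after) exactly as the Python does.
def bScan (t ms half : Int) :
    List ((Int × Int) × (Int × Int)) → Bool → Option Int → Option Int →
    Bool × Option Int × Option Int
  | [], st, bf, af => (st, bf, af)
  | ((ps, pe), (s, _e)) :: rest, st, bf, af =>
    let gap := decide (s - pe > ms)
    let stbf : Bool × Option Int :=
      if !st then
        if pe < t then (st, if gap then some (pe + half) else bf)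
        else if ps > t then (true, bf)
        else (st, bf)
      else (st, bf)
    let af' := if af.isNone && decide (s > t) && gap then some (pe + half) else af
    bScan t ms half rest stbf.1 stbf.2 af'

-- Source B's `pick`: the combined pass, the last-segment fixup, then the selection.
def bPick (ranges : List (Int × Int)) (t ms half : Int) : Int :=
  let r := bScan t ms half (ranges.zip (ranges.drop 1)) false none none
  let bf : Option Int :=
    match ranges.getLast? with
    | some q => if !r.1 && decide (q.2 < t) then some (q.2 + half) else r.2.1
    | none => r.2.1
  match bf with
  | some b => b
  | none => match r.2.2 with | some a => a | none => t

def bLoop (ranges : List (Int × Int)) (total maxL ms half : Int) :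
    Nat → Int → List Int → List Int
  | 0, _, pts => pts ++ [total]
  | fuel + 1, cur, pts =>
    if cur < total then
      let t := cur + maxL
      if t ≥ total then pts ++ [total]
      else
        let best := bPick ranges t ms half
        bLoop ranges total maxL ms half fuel best (pts ++ [best])
    else pts ++ [total]

def calculate_split_points_py_alt (non_silent_ranges : List (Int × Int)) (total_length_ms : Int) (max_length_ms : Int) (min_silence_len : Int) : List Int :=
  bLoop non_silent_ranges total_length_ms max_length_ms min_silence_len
    (PySem.Int.floordiv min_silence_len 2) (total_length_ms.toNat + 1099511627776) 0 [0]

-- ===== PRECONDITION & SPEC =====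
-- No Pre_: the two fuelled ports agree on every input (same fuel, same loop shape).
def Spec_calculate_split_points_py (non_silent_ranges : List (Int × Int)) (total_length_ms : Int) (max_length_ms : Int) (min_silence_len : Int) (out : List Int) : Prop := out = calculate_split_points_py_alt non_silent_ranges total_length_ms max_length_ms min_silence_len
instance (non_silent_ranges : List (Int × Int)) (total_length_ms : Int) (max_length_ms : Int) (min_silence_len : Int) (out : List Int) : Decidable (Spec_calculate_split_points_py non_silent_ranges total_length_ms max_length_ms min_silence_len out) := by unfold Spec_calculate_split_points_py; infer_instance

-- ===== CLAIM (what is proved, stated in full; the proofs are below) =====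
def Claim_equal_calculate_split_points_py : Prop := ∀ (non_silent_ranges : List (Int × Int)) (total_length_ms : Int) (max_length_ms : Int) (min_silence_len : Int), Dom_calculate_split_points_py non_silent_ranges total_length_ms max_length_ms min_silence_len → Spec_calculate_split_points_py non_silent_ranges total_length_ms max_length_ms min_silence_len (calculate_split_points_py non_silent_ranges total_length_ms max_length_ms min_silence_len)

-- ===== LEMMAS AND PROOFS =====

-- Proof-local decompositions of the single combined pass: its `before`/`stopped`
-- components and its `after` component evolve independently.
def bFirst (t ms half : Int) :
    List ((Int × Int) × (Int × Int)) → Bool → Option Int → Bool × Option Int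
  | [], st, bf => (st, bf)
  | ((ps, pe), (s, _e)) :: rest, st, bf =>
    if !st then
      if pe < t then
        bFirst t ms half rest st (if decide (s - pe > ms) then some (pe + half) else bf)
      else if ps > t then bFirst t ms half rest true bf
      else bFirst t ms half rest st bf
    else bFirst t ms half rest st bf

def bAfter (t ms half : Int) :
    List ((Int × Int) × (Int × Int)) → Option Int → Option Int
  | [], af => af
  | ((_ps, pe), (s, _e)) :: rest, af =>
    bAfter t ms half rest
      (if af.isNone && decide (s > t) && decide (s - pe > ms) then some (pe + half) else af)

theorem bScan_split (t ms half : Int) :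
    ∀ (l : List ((Int × Int) × (Int × Int))) (st : Bool) (bf af : Option Int),
      bScan t ms half l st bf af =
        ((bFirst t ms half l st bf).1, (bFirst t ms half l st bf).2,
          bAfter t ms half l af) := by
  intro l
  induction l with
  | nil => intro st bf af; rfl
  | cons hd rest ih =>
    obtain ⟨⟨ps, pe⟩, s, e⟩ := hd
    intro st bf af
    simp only [bScan, bFirst, bAfter]
    cases st <;> simp <;> split_ifs <;> simp [ih]

theorem bFirst_stopped (t ms half : Int) :
    ∀ (l : List ((Int × Int) × (Int × Int))) (bf : Option Int),
      bFirst t ms half l true bf = (true, bf) := by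
  intro l
  induction l with
  | nil => intro bf; rfl
  | cons hd rest ih =>
    obtain ⟨⟨ps, pe⟩, s, e⟩ := hd
    intro bf
    simp [bFirst, ih]

theorem bAfter_some (t ms half : Int) :
    ∀ (l : List ((Int × Int) × (Int × Int))) (a : Int),
      bAfter t ms half l (some a) = some a := by
  intro l
  induction l with
  | nil => intro a; rfl
  | cons hd rest ih =>
    obtain ⟨⟨ps, pe⟩, s, e⟩ := hd
    intro a
    simp [bAfter, ih]

theorem bAfter_none (t ms half : Int) :
    ∀ (l : List ((Int × Int) × (Int × Int))),
      bAfter t ms half l none =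
        match l.find? (fun q => decide (q.2.1 > t) && decide (q.2.1 - q.1.2 > ms)) with
        | some q => some (q.1.2 + half)
        | none => none := by
  intro l
  induction l with
  | nil => rfl
  | cons hd rest ih =>
    obtain ⟨⟨ps, pe⟩, s, e⟩ := hd
    by_cases h : (decide (s > t) && decide (s - pe > ms)) = true
    · rw [List.find?_cons_of_pos (by simpa using h)]
      simp only [bAfter, Option.isNone_none, Bool.true_and]
      rw [if_pos (by simpa using h)]
      exact bAfter_some t ms half rest (pe + half)
    · rw [List.find?_cons_of_neg (by simpa using h)]
      simp only [bAfter, Option.isNone_none, Bool.true_and]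
      rw [if_neg (by simpa using h)]
      exact ih

-- A's first scan over the suffix `l = all.drop i` equals Source B's pair pass over the
-- pairs of that suffix followed by the last-segment fixup.
theorem aBest1_eq_b (all : List (Int × Int)) (t ms : Int) :
    ∀ (l : List (Int × Int)) (i : Nat) (best : Option Int),
      all.drop i = l →
      aBest1 all t ms l i best =
        (match l.getLast? with
         | some q =>
           if !(bFirst t ms (PySem.Int.floordiv ms 2) (l.zip (l.drop 1)) false best).1
              && decide (q.2 < t)
           then some (q.2 + PySem.Int.floordiv ms 2)
           else (bFirst t ms (PySem.Int.floordiv ms 2) (l.zip (l.drop 1)) false best).2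
         | none => (bFirst t ms (PySem.Int.floordiv ms 2) (l.zip (l.drop 1)) false best).2) := by
  intro l
  induction l with
  | nil => intro i best h; rfl
  | cons hd rest ih =>
    obtain ⟨s, e⟩ := hd
    intro i best h
    have hi : i < all.length := by
      by_contra hc
      rw [List.drop_eq_nil_iff.mpr (by omega)] at h
      cases h
    have hdrop : all.drop (i + 1) = rest := by
      have := List.drop_eq_getElem_cons hi
      rw [h] at this
      injection this with _ h2
      exact h2.symm
    cases rest with
    | nil =>
      -- last element of the whole list: i + 1 = all.length
      have hlen : all.length ≤ i + 1 := List.drop_eq_nil_iff.mp hdrop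
      have hnot : ¬ (i + 1 < all.length) := by omega
      by_cases he : e < t
      · simp [aBest1, he, hnot, bFirst]
      · by_cases hs : s > t
        · simp [aBest1, he, hs, bFirst]
        · simp [aBest1, he, hs, bFirst]
    | cons hd2 r2 =>
      obtain ⟨s2, e2⟩ := hd2
      have hi1 : i + 1 < all.length := by
        by_contra hc
        rw [List.drop_eq_nil_iff.mpr (by omega)] at hdrop
        cases hdrop
      have hgd : all.getD (i + 1) (0, 0) = (s2, e2) := by
        rw [List.getD_eq_getElem _ _ hi1]
        have := List.drop_eq_getElem_cons hi1
        rw [hdrop] at this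
        injection this with h1 _
        exact h1.symm
      have hlast : ((s, e) :: (s2, e2) :: r2).getLast? = ((s2, e2) :: r2).getLast? := by
        simp [List.getLast?_cons_cons]
      have hpairs : (((s, e) :: (s2, e2) :: r2).zip (((s, e) :: (s2, e2) :: r2).drop 1)) =
          ((s, e), (s2, e2)) :: (((s2, e2) :: r2).zip (((s2, e2) :: r2).drop 1)) := by
        simp [List.zip]
      rw [hpairs]
      by_cases he : e < t
      · -- candidate branch; gap check against the next segment
        conv_lhs => rw [aBest1]
        rw [if_pos he, if_pos hi1, hgd]
        by_cases hg : s2 - e > ms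
        · rw [if_pos hg, ih (i + 1) (some (e + PySem.Int.floordiv ms 2)) hdrop, hlast]
          simp [bFirst, he, hg]
        · rw [if_neg hg, ih (i + 1) best hdrop, hlast]
          simp [bFirst, he, hg]
      · by_cases hs : s > t
        · -- A breaks; B sets stopped and never changes `before` again
          conv_lhs => rw [aBest1]
          rw [if_neg he, if_pos hs, hlast]
          have hb : bFirst t ms (PySem.Int.floordiv ms 2)
              (((s, e), (s2, e2)) :: (((s2, e2) :: r2).zip (((s2, e2) :: r2).drop 1))) false best
              = (true, best) := by
            simp [bFirst, he, hs, bFirst_stopped]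
          rw [hb]
          cases hl : ((s2, e2) :: r2).getLast? with
          | none => simp at hl
          | some q => simp
        · conv_lhs => rw [aBest1]
          rw [if_neg he, if_neg hs, ih (i + 1) best hdrop, hlast]
          simp [bFirst, he, hs]

-- A's second scan from index i ≥ 1 is a first-hit search over the pairs
-- (all.drop (i-1)).zip l.
theorem aBest2_eq_b (all : List (Int × Int)) (t ms : Int) :
    ∀ (l : List (Int × Int)) (i : Nat),
      all.drop i = l → 1 ≤ i →
      aBest2 all t ms l i =
        (match ((all.drop (i - 1)).zip l).find?
            (fun q => decide (q.2.1 > t) && decide (q.2.1 - q.1.2 > ms)) with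
         | some q => some (q.1.2 + PySem.Int.floordiv ms 2)
         | none => none) := by
  intro l
  induction l with
  | nil => intro i h h1; simp [aBest2]
  | cons hd rest ih =>
    obtain ⟨s, e⟩ := hd
    intro i h h1
    have hi : i < all.length := by
      by_contra hc
      rw [List.drop_eq_nil_iff.mpr (by omega)] at h
      cases h
    have hdrop : all.drop (i + 1) = rest := by
      have := List.drop_eq_getElem_cons hi
      rw [h] at this
      injection this with _ h2
      exact h2.symm
    have hi1 : i - 1 < all.length := by omega
    have hstep : all.drop (i - 1) = all[i - 1] :: ((s, e) :: rest) := by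
      have := List.drop_eq_getElem_cons hi1
      rw [show i - 1 + 1 = i by omega, h] at this
      exact this
    have hgd : all.getD (i - 1) (0, 0) = all[i - 1] := List.getD_eq_getElem _ _ hi1
    rw [hstep]
    have hzip : (all[i - 1] :: (s, e) :: rest).zip ((s, e) :: rest) =
        (all[i - 1], (s, e)) :: (((s, e) :: rest).zip rest) := by
      simp [List.zip]
    rw [hzip]
    by_cases hs : s > t
    · by_cases hg : s - all[i - 1].2 > ms
      · rw [List.find?_cons_of_pos (by simp [hs, hg])]
        conv_lhs => rw [aBest2]
        rw [if_pos hs, if_pos (by omega : i > 0), hgd, if_pos hg]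
      · rw [List.find?_cons_of_neg (by simp [hg])]
        conv_lhs => rw [aBest2]
        rw [if_pos hs, if_pos (by omega : i > 0), hgd, if_neg hg]
        have := ih (i + 1) hdrop (by omega)
        rw [show i + 1 - 1 = i by omega, h] at this
        exact this
    · rw [List.find?_cons_of_neg (by simp [hs])]
      conv_lhs => rw [aBest2]
      rw [if_neg hs]
      have := ih (i + 1) hdrop (by omega)
      rw [show i + 1 - 1 = i by omega, h] at this
      exact this

theorem aBest2_top (all : List (Int × Int)) (t ms : Int) :
    aBest2 all t ms all 0 =
      (match (all.zip (all.drop 1)).find?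
          (fun q => decide (q.2.1 > t) && decide (q.2.1 - q.1.2 > ms)) with
       | some q => some (q.1.2 + PySem.Int.floordiv ms 2)
       | none => none) := by
  cases all with
  | nil => rfl
  | cons hd rst =>
    obtain ⟨s, e⟩ := hd
    have h1 : aBest2 ((s, e) :: rst) t ms ((s, e) :: rst) 0 =
        aBest2 ((s, e) :: rst) t ms rst 1 := by
      by_cases hs : s > t <;> simp [aBest2, hs]
    rw [h1, aBest2_eq_b ((s, e) :: rst) t ms rst 1 rfl (by omega)]
    rfl

theorem bPick_eq (ranges : List (Int × Int)) (t ms : Int) :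
    bPick ranges t ms (PySem.Int.floordiv ms 2) =
      (match aBest1 ranges t ms ranges 0 none with
       | some b => b
       | none =>
         match aBest2 ranges t ms ranges 0 with
         | some b => b
         | none => t) := by
  have hA1 := aBest1_eq_b ranges t ms ranges 0 none List.drop_zero
  rw [hA1, aBest2_top]
  simp only [bPick, bScan_split, bAfter_none]

theorem loop_eq (ranges : List (Int × Int)) (total maxL ms : Int) :
    ∀ (fuel : Nat) (cur : Int) (pts : List Int),
      aLoop ranges total maxL ms fuel cur pts =
        bLoop ranges total maxL ms (PySem.Int.floordiv ms 2) fuel cur pts := by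
  intro fuel
  induction fuel with
  | zero => intro cur pts; rfl
  | succ n ih =>
    intro cur pts
    simp only [aLoop, bLoop, bPick_eq]
    split_ifs <;> simp [ih]

-- ===== VERDICT (by name: the statement is the Claim_ definition above) =====
theorem calculate_split_points_py_spec : Claim_equal_calculate_split_points_py := by
  intro r total maxL ms _
  unfold Spec_calculate_split_points_py calculate_split_points_py calculate_split_points_py_alt
  exact loop_eq r total maxL ms _ 0 [0]
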